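-- pv_equiv track=rewrite | github.com/arick-t/mama-wod | backend/scrapers/tonbridge.py | _is_first_level_header
-- ===== SOURCE A (Python) =====
-- FIRST_LEVEL_HEADERS = [
--     'strength', 'met con', 'metcon', 'wod', 'warm', 'warm up', 'conditioning',
--     'skill', 'gymnastics', 'cool down', 'accessory', 'olympic', 'endurance',
-- ]
--
-- def _is_first_level_header(line):
--     """True only if line is exactly or starts with a known section title (e.g. Strength:, Met Con:)."""
--     s = (line or '').strip()
--     if not s or len(s) > 70:
--         return False
--     lo = s.lower()
--     for h in FIRST_LEVEL_HEADERS: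
--         if lo == h or lo.startswith(h + ':') or lo.startswith(h + ' '):
--             return True
--     return False
-- ===== SOURCE B (Python) =====
-- FIRST_LEVEL_HEADERS = [
--     'strength', 'met con', 'metcon', 'wod', 'warm', 'warm up', 'conditioning',
--     'skill', 'gymnastics', 'cool down', 'accessory', 'olympic', 'endurance',
-- ]
--
-- _HSET = frozenset(FIRST_LEVEL_HEADERS)
-- _LENS = sorted({len(h) for h in FIRST_LEVEL_HEADERS})
--
-- def _is_first_level_header(line):
--     """True only if line is exactly or starts with a known section title (e.g. Strength:, Met Con:)."""
--     s = (line or '').strip()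
--     if not s or len(s) > 70:
--         return False
--     lo = s.lower()
--     n = len(lo)
--     return any(L <= n and (n == L or lo[L] in ': ') and lo[:L] in _HSET
--                for L in _LENS)
-- ===== Notes on version B (the rewrite author's own statement) =====
-- stated objective: alternative
-- what changed: Replaces the scan over the 13 header strings (each tried three ways: equality, '+:' prefix, '+ ' prefix) by a loop over the 8 distinct header lengths: for each length L it checks the boundary character lo[L] (':', ' ' or end of string) and tests the L-prefix by hash-set membership, so no per-header string concatenation or prefix scan is done.
import Mathlib
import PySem

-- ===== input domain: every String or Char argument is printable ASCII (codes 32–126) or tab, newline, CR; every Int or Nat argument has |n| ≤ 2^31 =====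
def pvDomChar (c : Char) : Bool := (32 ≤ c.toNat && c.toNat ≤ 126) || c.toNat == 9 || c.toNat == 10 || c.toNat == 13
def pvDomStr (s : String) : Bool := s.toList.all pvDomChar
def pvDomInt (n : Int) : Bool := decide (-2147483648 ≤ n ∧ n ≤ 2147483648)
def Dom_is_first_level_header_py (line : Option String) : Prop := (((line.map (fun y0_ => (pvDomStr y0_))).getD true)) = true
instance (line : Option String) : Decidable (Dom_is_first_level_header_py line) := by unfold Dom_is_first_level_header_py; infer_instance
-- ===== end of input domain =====

-- B replaces the scan over the 13 header strings by a loop over the 8 distinct header lengths,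
-- testing the boundary character and the length-prefix by set membership (objective: alternative).

-- ===== PORT A =====
def FIRST_LEVEL_HEADERS : List String :=
  ["strength", "met con", "metcon", "wod", "warm", "warm up", "conditioning",
   "skill", "gymnastics", "cool down", "accessory", "olympic", "endurance"]

def is_first_level_header_py (line : Option String) : Bool :=
  let s := PySem.Str.strip (line.getD "")
  if s == "" || 70 < PySem.Str.len s then false
  else
    let lo := PySem.Str.lower s
    FIRST_LEVEL_HEADERS.any (fun h =>
      lo == h || PySem.Str.startswith lo (h ++ ":") || PySem.Str.startswith lo (h ++ " "))

-- ===== PORT B =====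
def hdrSet : PySem.Set String := PySem.Set.ofList FIRST_LEVEL_HEADERS

def hdrLens : List Int :=
  PySem.List.sorted (PySem.Set.ofList (FIRST_LEVEL_HEADERS.map PySem.Str.len)) (fun L => L)

def is_first_level_header_py_alt (line : Option String) : Bool :=
  let s := PySem.Str.strip (line.getD "")
  if s == "" || 70 < PySem.Str.len s then false
  else
    let lo := PySem.Str.lower s
    let n := PySem.Str.len lo
    hdrLens.any (fun L =>
      decide (L ≤ n) &&
      ((n == L) || (PySem.Str.pyGet? lo L).elim false (fun c => c == ':' || c == ' ')) &&
      PySem.Set.contains hdrSet (PySem.Str.slice lo none (some L)))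

-- ===== PRECONDITION & SPEC =====
def Spec_is_first_level_header_py (line : Option String) (out : Bool) : Prop := out = is_first_level_header_py_alt line
instance (line : Option String) (out : Bool) : Decidable (Spec_is_first_level_header_py line out) := by unfold Spec_is_first_level_header_py; infer_instance

-- ===== CLAIM (what is proved, stated in full; the proofs are below) =====
def Claim_equal_is_first_level_header_py : Prop := ∀ (line : Option String), Dom_is_first_level_header_py line → Spec_is_first_level_header_py line (is_first_level_header_py line)

-- ===== LEMMAS AND PROOFS =====

-- A header accepts lo iff lo's prefix of the header's length is the header and the next
-- character (if any) is ':' or ' '.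
def Cond (cs : List Char) (h : String) : Prop :=
  cs.take h.toList.length = h.toList ∧
  (cs.length = h.toList.length ∨ ∃ c, cs[h.toList.length]? = some c ∧ (c = ':' ∨ c = ' '))

theorem prefix_snoc_iff (cs hs : List Char) (c : Char) :
    hs ++ [c] <+: cs ↔ cs.take hs.length = hs ∧ cs[hs.length]? = some c := by
  constructor
  · rintro ⟨t, rfl⟩
    rw [List.append_assoc]
    refine ⟨List.take_left, ?_⟩
    simp
  · rintro ⟨h1, h2⟩
    obtain ⟨hlt, hget⟩ := List.getElem?_eq_some_iff.mp h2
    refine ⟨cs.drop (hs.length + 1), ?_⟩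
    conv_rhs => rw [← List.take_append_drop hs.length cs]
    rw [List.drop_eq_getElem_cons hlt, h1, hget]
    simp

theorem eq_iff_take (cs hs : List Char) :
    cs = hs ↔ cs.take hs.length = hs ∧ cs.length = hs.length := by
  constructor
  · rintro rfl; simp
  · rintro ⟨h1, h2⟩
    rw [← h1, ← h2, List.take_length]

theorem headCond_iff (lo h : String) :
    (lo == h || PySem.Str.startswith lo (h ++ ":") || PySem.Str.startswith lo (h ++ " ")) = true
      ↔ Cond lo.toList h := by
  have hc : (":" : String).toList = [':'] := rfl
  have hsp : (" " : String).toList = [' '] := rfl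
  have heq : (lo = h) ↔ lo.toList = h.toList := by
    constructor
    · rintro rfl; rfl
    · intro hh; exact String.ext (by simpa [String.toList] using hh)
  simp only [Bool.or_eq_true, beq_iff_eq, PySem.Str.startswith_eq, PySem.Chars.startswith_iff,
    String.toList_append, hc, hsp, heq]
  rw [prefix_snoc_iff lo.toList h.toList ':', prefix_snoc_iff lo.toList h.toList ' ',
    eq_iff_take lo.toList h.toList]
  unfold Cond
  constructor
  · rintro ((⟨h1, h2⟩ | ⟨h1, h2⟩) | ⟨h1, h2⟩)
    · exact ⟨h1, Or.inl h2⟩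
    · exact ⟨h1, Or.inr ⟨':', h2, Or.inl rfl⟩⟩
    · exact ⟨h1, Or.inr ⟨' ', h2, Or.inr rfl⟩⟩
  · rintro ⟨h1, h2 | ⟨c, hg, rfl | rfl⟩⟩
    · exact Or.inl (Or.inl ⟨h1, h2⟩)
    · exact Or.inl (Or.inr ⟨h1, hg⟩)
    · exact Or.inr ⟨h1, hg⟩

theorem anyA_iff (lo : String) :
    (FIRST_LEVEL_HEADERS.any (fun h =>
      lo == h || PySem.Str.startswith lo (h ++ ":") || PySem.Str.startswith lo (h ++ " "))) = true
      ↔ ∃ h ∈ FIRST_LEVEL_HEADERS, Cond lo.toList h := by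
  simp only [List.any_eq_true, headCond_iff]

theorem elim_bool_iff (o : Option Char) :
    (o.elim false (fun c => c == ':' || c == ' ')) = true ↔ ∃ c, o = some c ∧ (c = ':' ∨ c = ' ') := by
  cases o with
  | none => simp
  | some a =>
    simp only [Option.elim, Bool.or_eq_true, beq_iff_eq, Option.some.injEq]
    constructor
    · rintro (rfl | rfl)
      · exact ⟨':', rfl, Or.inl rfl⟩
      · exact ⟨' ', rfl, Or.inr rfl⟩
    · rintro ⟨c, rfl, hcc⟩
      exact hcc

theorem contains_slice_iff (lo : String) (k : Nat) (h : String) :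
    (PySem.Str.slice lo none (some (k : Int)) = h) ↔ lo.toList.take k = h.toList := by
  constructor
  · rintro rfl
    rw [PySem.Str.toList_slice, PySem.Chars.slice_eq_listSlice,
      PySem.List.slice_to _ (by positivity : (0:Int) ≤ (k:Int))]
    simp
  · intro hh
    apply String.ext
    have := PySem.Str.toList_slice lo none (some (k : Int))
    rw [PySem.Chars.slice_eq_listSlice, PySem.List.slice_to _ (by positivity : (0:Int) ≤ (k:Int))] at this
    simp only [Int.toNat_natCast] at this
    simpa [String.toList] using this.trans hh

theorem fB_iff (lo : String) (L : Int) (hL : 0 ≤ L) :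
    (decide (L ≤ PySem.Str.len lo) &&
      ((PySem.Str.len lo == L) || (PySem.Str.pyGet? lo L).elim false (fun c => c == ':' || c == ' ')) &&
      PySem.Set.contains hdrSet (PySem.Str.slice lo none (some L))) = true
    ↔ (L.toNat ≤ lo.toList.length ∧
       (lo.toList.length = L.toNat ∨ ∃ c, lo.toList[L.toNat]? = some c ∧ (c = ':' ∨ c = ' ')) ∧
       ∃ h ∈ FIRST_LEVEL_HEADERS, lo.toList.take L.toNat = h.toList) := by
  obtain ⟨k, rfl⟩ := Int.eq_ofNat_of_zero_le hL
  have hcont : ∀ x : String, (PySem.Set.contains hdrSet x = true) ↔ x ∈ FIRST_LEVEL_HEADERS := by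
    intro x
    simp [hdrSet, PySem.Set.contains]
  simp only [Bool.and_eq_true, decide_eq_true_iff, Bool.or_eq_true, beq_iff_eq,
    PySem.Str.len_eq, PySem.Str.pyGet?_natCast, elim_bool_iff, hcont, Int.toNat_natCast,
    Nat.cast_le, Nat.cast_inj]
  constructor
  · rintro ⟨⟨h1, h2⟩, h3⟩
    exact ⟨h1, h2, _, h3, (contains_slice_iff lo k _).mp rfl⟩
  · rintro ⟨h1, h2, h, hm, ht⟩
    refine ⟨⟨h1, h2⟩, ?_⟩
    rw [(contains_slice_iff lo k h).mpr ht]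
    exact hm

theorem hdrLens_eval : hdrLens = [3, 4, 5, 6, 7, 8, 9, 10, 12] := by decide

theorem lens_mem : ∀ h ∈ FIRST_LEVEL_HEADERS, ((h.toList.length : Int)) ∈ hdrLens := by decide

theorem anyB_iff (lo : String) :
    (hdrLens.any (fun L =>
      decide (L ≤ PySem.Str.len lo) &&
      ((PySem.Str.len lo == L) || (PySem.Str.pyGet? lo L).elim false (fun c => c == ':' || c == ' ')) &&
      PySem.Set.contains hdrSet (PySem.Str.slice lo none (some L)))) = true
      ↔ ∃ h ∈ FIRST_LEVEL_HEADERS, Cond lo.toList h := by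
  rw [List.any_eq_true]
  constructor
  · rintro ⟨L, hLmem, hfB⟩
    have hL0 : 0 ≤ L := by
      rw [hdrLens_eval] at hLmem
      simp only [List.mem_cons, List.not_mem_nil, or_false] at hLmem
      rcases hLmem with rfl | rfl | rfl | rfl | rfl | rfl | rfl | rfl | rfl <;> norm_num
    obtain ⟨h1, h2, h, hmem, htake⟩ := (fB_iff lo L hL0).mp hfB
    have hlen : h.toList.length = L.toNat := by
      have := congrArg List.length htake
      simp only [List.length_take] at this
      omega
    refine ⟨h, hmem, ?_, ?_⟩
    · rw [hlen]; exact htake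
    · rw [hlen]; exact h2
  · rintro ⟨h, hmem, htake, hbnd⟩
    refine ⟨(h.toList.length : Int), lens_mem h hmem, ?_⟩
    apply (fB_iff lo _ (by positivity)).mpr
    have hle : h.toList.length ≤ lo.toList.length := by
      have := congrArg List.length htake
      simp only [List.length_take] at this
      omega
    simp only [Int.toNat_natCast]
    exact ⟨hle, hbnd, h, hmem, htake⟩

theorem core (lo : String) :
    (FIRST_LEVEL_HEADERS.any (fun h =>
      lo == h || PySem.Str.startswith lo (h ++ ":") || PySem.Str.startswith lo (h ++ " ")))
    = (hdrLens.any (fun L =>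
      decide (L ≤ PySem.Str.len lo) &&
      ((PySem.Str.len lo == L) || (PySem.Str.pyGet? lo L).elim false (fun c => c == ':' || c == ' ')) &&
      PySem.Set.contains hdrSet (PySem.Str.slice lo none (some L)))) := by
  rw [Bool.eq_iff_iff, anyA_iff, anyB_iff]

-- ===== VERDICT (by name: the statement is the Claim_ definition above) =====
theorem is_first_level_header_py_spec : Claim_equal_is_first_level_header_py := by
  intro line _
  unfold Spec_is_first_level_header_py is_first_level_header_py is_first_level_header_py_alt
  dsimp only
  split
  · rfl
  · exact core _
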